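-- pv_equiv track=rewrite | github.com/hinrikur/far-ABLTagger | scripts/inflection/extract_UM_applicable_lemmas.py | multiply_forms
-- ===== SOURCE A (Python) =====
-- def multiply_forms(word_list):
--     for word in word_list:
--         for form in word:
--             if form[2] == 'ADJ;NOM/ACC;NEUT;SG':
--                 form[2] = 'ADJ;NOM;NEUT;SG'
--                 word.append([form[0], form[1], 'ADJ;ACC;NEUT;SG'])
--             elif form[2] == 'V;IND;PRS;3':
--                 word.append([form[0], form[1], 'V;IND;PRS;2'])
--                 word.append([form[0], form[1], 'V;IND;PRS;1'])
--             elif form[2] == 'V;IND;PST;3':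
--                 word.append([form[0], form[1], 'V;IND;PST;2'])
--                 word.append([form[0], form[1], 'V;IND;PST;1'])
--             elif form[2] == 'ADJ;FEM;PL':
--                 form[2] = 'ADJ;NOM;FEM;SG'
--                 word.append([form[0], form[1], 'ADJ;ACC;FEM;PL'])
--                 word.append([form[0], form[1], 'ADJ;DAT;FEM;PL'])
--                 word.append([form[0], form[1], 'ADJ;GEN;FEM;PL'])
--             elif form[2] == 'ADJ;NEUT;PL':
--                 form[2] = 'ADJ;NOM;NEUT;SG'
--                 word.append([form[0], form[1], 'ADJ;ACC;NEUT;PL'])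
--                 word.append([form[0], form[1], 'ADJ;DAT;NEUT;PL'])
--                 word.append([form[0], form[1], 'ADJ;GEN;NEUT;PL'])
--
--     return word_list
-- ===== SOURCE B (Python) =====
-- _REPL = {
--     'ADJ;NOM/ACC;NEUT;SG': 'ADJ;NOM;NEUT;SG',
--     'ADJ;FEM;PL': 'ADJ;NOM;FEM;SG',
--     'ADJ;NEUT;PL': 'ADJ;NOM;NEUT;SG',
-- }
--
-- _EXTRA = {
--     'ADJ;NOM/ACC;NEUT;SG': ['ADJ;ACC;NEUT;SG'],
--     'V;IND;PRS;3': ['V;IND;PRS;2', 'V;IND;PRS;1'],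
--     'V;IND;PST;3': ['V;IND;PST;2', 'V;IND;PST;1'],
--     'ADJ;FEM;PL': ['ADJ;ACC;FEM;PL', 'ADJ;DAT;FEM;PL', 'ADJ;GEN;FEM;PL'],
--     'ADJ;NEUT;PL': ['ADJ;ACC;NEUT;PL', 'ADJ;DAT;NEUT;PL', 'ADJ;GEN;NEUT;PL'],
-- }
--
--
-- def _expand(word):
--     # stage 1: the original forms with their labels fixed up
--     fixed = [form[:2] + [_REPL.get(form[2], form[2])] + form[3:] for form in word]
--     # stage 2: all derived forms, in trigger order
--     extras = [[form[0], form[1], label]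
--               for form in word
--               for label in _EXTRA.get(form[2], [])]
--     return fixed + extras
--
--
-- def multiply_forms(word_list):
--     # Pure staged construction: each word becomes a FRESH list (fixed-up
--     # originals followed by all derived additions) instead of A's in-place
--     # mutation of, and appending to, the list being iterated.  Equal as a
--     # return value; B does not mutate its argument (A does).
--     return [_expand(word) for word in word_list]
-- ===== Notes on version B (the rewrite author's own statement) =====
-- stated objective: simpler
-- what changed: B is a pure two-stage construction: it builds a fresh list per word as (map of label-fixed originals) ++ (flat-map of derived additions), instead of A's single pass that mutates the word in place and appends to the very list it is iterating; B does not mutate its argument, so the equivalence is about the return value.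
import Mathlib
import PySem

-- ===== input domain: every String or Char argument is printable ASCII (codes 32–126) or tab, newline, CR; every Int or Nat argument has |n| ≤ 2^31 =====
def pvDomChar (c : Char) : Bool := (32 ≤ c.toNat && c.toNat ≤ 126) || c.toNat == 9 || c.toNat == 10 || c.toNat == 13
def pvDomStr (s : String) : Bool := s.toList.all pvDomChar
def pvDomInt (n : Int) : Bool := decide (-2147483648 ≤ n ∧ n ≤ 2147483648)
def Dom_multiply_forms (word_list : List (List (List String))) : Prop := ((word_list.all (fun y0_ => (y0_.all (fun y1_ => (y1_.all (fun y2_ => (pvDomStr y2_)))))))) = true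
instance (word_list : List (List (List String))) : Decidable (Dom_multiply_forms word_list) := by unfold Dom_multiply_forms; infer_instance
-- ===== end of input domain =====

-- B builds each output word as a pure two-stage construction (map of fixed-up originals ++
-- flat-map of derived additions) instead of A's single pass that mutates the word in place and
-- appends to the list being iterated (objective: simpler).  Python A mutates its argument, B
-- does not; the equivalence proved here is about the return value only.

-- ===== PORT A =====
-- A iterates over `word` WHILE appending to it; the port models this as a done/todo queue
-- where appends go to the end of `todo`.  Termination: appended forms carry non-trigger
-- labels, so the trigger count of `todo` drops lexicographically with its length; the
-- helpers and lemmas below exist for that measure and are cited in the termination proof.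
def pvIsTrigLabel (s : String) : Bool :=
  s == "ADJ;NOM/ACC;NEUT;SG" || s == "V;IND;PRS;3" || s == "V;IND;PST;3" ||
  s == "ADJ;FEM;PL" || s == "ADJ;NEUT;PL"

def pvIsTrig (f : List String) : Bool :=
  match PySem.List.pyGet? f 2 with
  | some s => pvIsTrigLabel s
  | none => false

def pvTrigCount (ws : List (List String)) : Nat := (ws.filter pvIsTrig).length

theorem pvTrigCount_nil : pvTrigCount [] = 0 := rfl

theorem pvIsTrig_triple (a b c : String) : pvIsTrig [a, b, c] = pvIsTrigLabel c := by
  simp [pvIsTrig]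

theorem pvIsTrig_of_get {f : List String} {s : String}
    (h : PySem.List.pyGet? f 2 = some s) : pvIsTrig f = pvIsTrigLabel s := by
  simp [pvIsTrig, h]

theorem pvTrigCount_append (xs ys : List (List String)) :
    pvTrigCount (xs ++ ys) = pvTrigCount xs + pvTrigCount ys := by
  simp [pvTrigCount]

theorem pvTrigCount_cons (f : List String) (xs : List (List String)) :
    pvTrigCount (f :: xs) = (if pvIsTrig f then 1 else 0) + pvTrigCount xs := by
  simp only [pvTrigCount, List.filter_cons]
  split
  · simp
    omega
  · simp

-- the inner Python loop: `done` holds the forms already visited (with in-place label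
-- replacements applied), `todo` the forms still to visit; `word.append` puts new forms
-- at the end of `todo`.  If form[2] does not exist Python raises IndexError (outside Pre_).
def pvLoopA (done todo : List (List String)) : List (List String) :=
  match todo with
  | [] => done
  | form :: rest =>
    match h : PySem.List.pyGet? form 2 with
    | none => done ++ form :: rest  -- Python raises IndexError here; excluded by Pre_
    | some f2 =>
      let f0 := (PySem.List.pyGet? form 0).getD ""
      let f1 := (PySem.List.pyGet? form 1).getD ""
      if hc1 : f2 = "ADJ;NOM/ACC;NEUT;SG" then
        pvLoopA (done ++ [PySem.List.pySetD form 2 "ADJ;NOM;NEUT;SG"])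
          (rest ++ [[f0, f1, "ADJ;ACC;NEUT;SG"]])
      else if hc2 : f2 = "V;IND;PRS;3" then
        pvLoopA (done ++ [form]) (rest ++ [[f0, f1, "V;IND;PRS;2"], [f0, f1, "V;IND;PRS;1"]])
      else if hc3 : f2 = "V;IND;PST;3" then
        pvLoopA (done ++ [form]) (rest ++ [[f0, f1, "V;IND;PST;2"], [f0, f1, "V;IND;PST;1"]])
      else if hc4 : f2 = "ADJ;FEM;PL" then
        pvLoopA (done ++ [PySem.List.pySetD form 2 "ADJ;NOM;FEM;SG"])
          (rest ++ [[f0, f1, "ADJ;ACC;FEM;PL"], [f0, f1, "ADJ;DAT;FEM;PL"], [f0, f1, "ADJ;GEN;FEM;PL"]])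
      else if hc5 : f2 = "ADJ;NEUT;PL" then
        pvLoopA (done ++ [PySem.List.pySetD form 2 "ADJ;NOM;NEUT;SG"])
          (rest ++ [[f0, f1, "ADJ;ACC;NEUT;PL"], [f0, f1, "ADJ;DAT;NEUT;PL"], [f0, f1, "ADJ;GEN;NEUT;PL"]])
      else
        pvLoopA (done ++ [form]) rest
termination_by (pvTrigCount todo, todo.length)
decreasing_by
  all_goals simp only [Prod.lex_iff, pvTrigCount_append, pvTrigCount_cons, pvIsTrig_triple,
    pvIsTrig_of_get h, pvTrigCount_nil, List.length_append, List.length_cons]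
  all_goals simp_all [pvIsTrigLabel]

def multiply_forms (word_list : List (List (List String))) : List (List (List String)) :=
  word_list.map (fun word => pvLoopA [] word)

-- ===== PORT B =====
-- the module-level tables _REPL and _EXTRA
def pvRepl : PySem.Dict String String :=
  PySem.Dict.ofList
    [("ADJ;NOM/ACC;NEUT;SG", "ADJ;NOM;NEUT;SG"),
     ("ADJ;FEM;PL", "ADJ;NOM;FEM;SG"),
     ("ADJ;NEUT;PL", "ADJ;NOM;NEUT;SG")]

def pvExtra : PySem.Dict String (List String) :=
  PySem.Dict.ofList
    [("ADJ;NOM/ACC;NEUT;SG", ["ADJ;ACC;NEUT;SG"]),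
     ("V;IND;PRS;3", ["V;IND;PRS;2", "V;IND;PRS;1"]),
     ("V;IND;PST;3", ["V;IND;PST;2", "V;IND;PST;1"]),
     ("ADJ;FEM;PL", ["ADJ;ACC;FEM;PL", "ADJ;DAT;FEM;PL", "ADJ;GEN;FEM;PL"]),
     ("ADJ;NEUT;PL", ["ADJ;ACC;NEUT;PL", "ADJ;DAT;NEUT;PL", "ADJ;GEN;NEUT;PL"])]

-- stage 1 body: form[:2] + [_REPL.get(form[2], form[2])] + form[3:]
def pvFixB (form : List String) : List String :=
  match PySem.List.pyGet? form 2 with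
  | none => form  -- Python raises IndexError here; excluded by Pre_
  | some c =>
    PySem.List.slice form none (some 2) ++ [pvRepl.getD c c] ++ PySem.List.slice form (some 3) none

-- stage 2 body: [[form[0], form[1], label] for label in _EXTRA.get(form[2], [])]
def pvExtrasB (form : List String) : List (List String) :=
  match PySem.List.pyGet? form 2 with
  | none => []  -- Python raises IndexError here; excluded by Pre_
  | some c =>
    (pvExtra.getD c []).map (fun label =>
      [(PySem.List.pyGet? form 0).getD "", (PySem.List.pyGet? form 1).getD "", label])

def pvExpandB (word : List (List String)) : List (List String) :=
  word.map pvFixB ++ word.flatMap pvExtrasB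

def multiply_forms_alt (word_list : List (List (List String))) : List (List (List String)) :=
  word_list.map pvExpandB

-- ===== PRECONDITION & SPEC =====
-- Python A raises IndexError on form[2] exactly when some form has fewer than 3 entries.
def Pre_multiply_forms (word_list : List (List (List String))) : Prop :=
  ∀ word ∈ word_list, ∀ form ∈ word, 3 ≤ form.length
instance (word_list : List (List (List String))) : Decidable (Pre_multiply_forms word_list) := by
  unfold Pre_multiply_forms; infer_instance

def pvWitness_multiply_forms : List (List (List String)) :=
  [[["fara", "for", "V;IND;PST;3"], ["fara", "fer", "V;IND;PRS;3"]],
   [["gulur", "gult", "ADJ;NOM/ACC;NEUT;SG"], ["gulur", "gulum", "x"]]]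

def Spec_multiply_forms (word_list : List (List (List String))) (out : List (List (List String))) : Prop := out = multiply_forms_alt word_list
instance (word_list : List (List (List String))) (out : List (List (List String))) : Decidable (Spec_multiply_forms word_list out) := by unfold Spec_multiply_forms; infer_instance

-- ===== CLAIM (what is proved, stated in full; the proofs are below) =====
def Claim_equal_multiply_forms : Prop := ∀ (word_list : List (List (List String))), Dom_multiply_forms word_list → Pre_multiply_forms word_list → Spec_multiply_forms word_list (multiply_forms word_list)

-- ===== LEMMAS AND PROOFS =====

theorem pvGet2_cons (a b c : String) (t : List String) :
    PySem.List.pyGet? (a::b::c::t) 2 = some c := by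
  simp only [PySem.List.pyGet?, PySem.List.pyIdx?, List.length_cons]
  split
  · split
    · simp
    · omega
  · omega

theorem pvSet2_cons (a b c : String) (t : List String) (r : String) :
    PySem.List.pySetD (a::b::c::t) 2 r = a::b::r::t := by
  simp only [PySem.List.pySetD, PySem.List.pySet?, PySem.List.pyIdx?, List.length_cons]
  split
  · split
    · simp
    · omega
  · omega

theorem pvGet0_cons (a : String) (t : List String) :
    PySem.List.pyGet? (a::t) 0 = some a := by
  simp only [PySem.List.pyGet?, PySem.List.pyIdx?, List.length_cons]
  split
  · split
    · simp
    · omega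
  · omega

theorem pvGet1_cons (a b : String) (t : List String) :
    PySem.List.pyGet? (a::b::t) 1 = some b := by
  simp only [PySem.List.pyGet?, PySem.List.pyIdx?, List.length_cons]
  split
  · split
    · simp
    · omega
  · omega

-- B's stage-1 body on a form of length ≥ 3 is an index-2 replacement
theorem pvFixB_cons (a b c : String) (t : List String) :
    pvFixB (a::b::c::t) = a::b::(pvRepl.getD c c)::t := by
  simp [pvFixB, pvGet2_cons, PySem.List.slice]

theorem pvExtrasB_cons (a b c : String) (t : List String) :
    pvExtrasB (a::b::c::t) = (pvExtra.getD c []).map (fun label => [a, b, label]) := by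
  simp [pvExtrasB, pvGet2_cons, pvGet1_cons]

-- the tables at each of the five trigger labels, and away from them
theorem pvRepl_t1 : pvRepl.getD "ADJ;NOM/ACC;NEUT;SG" "ADJ;NOM/ACC;NEUT;SG" = "ADJ;NOM;NEUT;SG" := by decide
theorem pvRepl_t4 : pvRepl.getD "ADJ;FEM;PL" "ADJ;FEM;PL" = "ADJ;NOM;FEM;SG" := by decide
theorem pvRepl_t5 : pvRepl.getD "ADJ;NEUT;PL" "ADJ;NEUT;PL" = "ADJ;NOM;NEUT;SG" := by decide
theorem pvExtra_t1 : pvExtra.getD "ADJ;NOM/ACC;NEUT;SG" [] = ["ADJ;ACC;NEUT;SG"] := by decide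
theorem pvExtra_t2 : pvExtra.getD "V;IND;PRS;3" [] = ["V;IND;PRS;2", "V;IND;PRS;1"] := by decide
theorem pvExtra_t3 : pvExtra.getD "V;IND;PST;3" [] = ["V;IND;PST;2", "V;IND;PST;1"] := by decide
theorem pvExtra_t4 : pvExtra.getD "ADJ;FEM;PL" [] = ["ADJ;ACC;FEM;PL", "ADJ;DAT;FEM;PL", "ADJ;GEN;FEM;PL"] := by decide
theorem pvExtra_t5 : pvExtra.getD "ADJ;NEUT;PL" [] = ["ADJ;ACC;NEUT;PL", "ADJ;DAT;NEUT;PL", "ADJ;GEN;NEUT;PL"] := by decide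

theorem pvRepl_none (s : String) (h : pvIsTrigLabel s = false) : pvRepl.getD s s = s := by
  simp only [pvIsTrigLabel, Bool.or_eq_false_iff, beq_eq_false_iff_ne, ne_eq] at h
  obtain ⟨⟨⟨⟨h1, _⟩, _⟩, h4⟩, h5⟩ := h
  have hk : pvRepl.keys = ["ADJ;NOM/ACC;NEUT;SG", "ADJ;FEM;PL", "ADJ;NEUT;PL"] := by decide
  have : pvRepl.get? s = none := by
    rw [PySem.Dict.get?_eq_none_iff_not_mem_keys, hk]; simp [h1, h4, h5]
  simp [PySem.Dict.getD, this]

theorem pvRepl_nontrig2 : pvRepl.getD "V;IND;PRS;3" "V;IND;PRS;3" = "V;IND;PRS;3" := by decide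
theorem pvRepl_nontrig3 : pvRepl.getD "V;IND;PST;3" "V;IND;PST;3" = "V;IND;PST;3" := by decide

theorem pvExtra_none (s : String) (h : pvIsTrigLabel s = false) : pvExtra.getD s [] = [] := by
  simp only [pvIsTrigLabel, Bool.or_eq_false_iff, beq_eq_false_iff_ne, ne_eq] at h
  obtain ⟨⟨⟨⟨h1, h2⟩, h3⟩, h4⟩, h5⟩ := h
  have hk : pvExtra.keys =
      ["ADJ;NOM/ACC;NEUT;SG", "V;IND;PRS;3", "V;IND;PST;3", "ADJ;FEM;PL", "ADJ;NEUT;PL"] := by decide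
  have : pvExtra.get? s = none := by
    rw [PySem.Dict.get?_eq_none_iff_not_mem_keys, hk]; simp [h1, h2, h3, h4, h5]
  simp [PySem.Dict.getD, this]

-- "inert" forms: length 3 with a non-trigger label (what A appends and later re-scans)
def pvInert (f : List String) : Bool :=
  match PySem.List.pyGet? f 2 with
  | some s => !(pvIsTrigLabel s)
  | none => false

theorem pvInert_triple (a b c : String) : pvInert [a, b, c] = !(pvIsTrigLabel c) := by
  simp [pvInert]

-- A's loop over inert forms only is a no-op
theorem pvLoopA_inert (pend : List (List String)) :
    ∀ done, pend.all pvInert = true → pvLoopA done pend = done ++ pend := by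
  induction pend with
  | nil => intro done _; rw [pvLoopA]; simp
  | cons p ps ih =>
    intro done hall
    simp only [List.all_cons, Bool.and_eq_true] at hall
    obtain ⟨hp, hps⟩ := hall
    rw [pvLoopA]
    cases h : PySem.List.pyGet? p 2 with
    | none => simp [pvInert, h] at hp
    | some s =>
      have hs : pvIsTrigLabel s = false := by
        simp only [pvInert, h, Bool.not_eq_true'] at hp; exact hp
      simp only [pvIsTrigLabel, Bool.or_eq_false_iff, beq_eq_false_iff_ne, ne_eq] at hs
      obtain ⟨⟨⟨⟨h1, h2⟩, h3⟩, h4⟩, h5⟩ := hs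
      simp only [dif_neg h1, dif_neg h2, dif_neg h3, dif_neg h4, dif_neg h5]
      rw [ih _ hps]
      simp

-- main invariant: A's queue loop, with the still-unvisited appended forms `pend` at the
-- end of the queue, computes B's stage-1 forms, then the pending additions, then B's
-- stage-2 additions.
theorem pvLoopA_main (orig : List (List String)) :
    ∀ pend done, (∀ f ∈ orig, 3 ≤ f.length) → pend.all pvInert = true →
      pvLoopA done (orig ++ pend) = done ++ orig.map pvFixB ++ pend ++ orig.flatMap pvExtrasB := by
  induction orig with
  | nil =>
    intro pend done _ hpend
    rw [List.nil_append, pvLoopA_inert pend done hpend]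
    simp
  | cons f fs ih =>
    intro pend done hlen hpend
    obtain ⟨a, b, c, t, rfl⟩ : ∃ a b c t, f = a :: b :: c :: t := by
      have h3 := hlen f (List.mem_cons_self ..)
      match f, h3 with | a::b::c::t, _ => exact ⟨a, b, c, t, rfl⟩
    have hfs : ∀ g ∈ fs, 3 ≤ g.length := fun g hg => hlen g (List.mem_cons_of_mem _ hg)
    rw [List.cons_append, pvLoopA]
    cases hg : PySem.List.pyGet? (a :: b :: c :: t) 2 with
    | none => rw [pvGet2_cons] at hg; cases hg
    | some s =>
      rw [pvGet2_cons] at hg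
      injection hg with hs
      subst hs
      simp only [pvGet0_cons, pvGet1_cons, Option.getD_some]
      rw [List.map_cons, List.flatMap_cons, pvFixB_cons, pvExtrasB_cons]
      by_cases hc1 : c = "ADJ;NOM/ACC;NEUT;SG"
      · subst hc1
        rw [dif_pos rfl, List.append_assoc fs]
        rw [ih _ _ hfs (by simp [List.all_append, List.all_cons, hpend, pvInert_triple, pvIsTrigLabel])]
        simp [pvRepl_t1, pvExtra_t1, pvSet2_cons]
      · rw [dif_neg hc1]
        by_cases hc2 : c = "V;IND;PRS;3"
        · subst hc2
          rw [dif_pos rfl, List.append_assoc fs]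
          rw [ih _ _ hfs (by simp [List.all_append, List.all_cons, hpend, pvInert_triple, pvIsTrigLabel])]
          simp [pvRepl_nontrig2, pvExtra_t2]
        · rw [dif_neg hc2]
          by_cases hc3 : c = "V;IND;PST;3"
          · subst hc3
            rw [dif_pos rfl, List.append_assoc fs]
            rw [ih _ _ hfs (by simp [List.all_append, List.all_cons, hpend, pvInert_triple, pvIsTrigLabel])]
            simp [pvRepl_nontrig3, pvExtra_t3]
          · rw [dif_neg hc3]
            by_cases hc4 : c = "ADJ;FEM;PL"
            · subst hc4
              rw [dif_pos rfl, List.append_assoc fs]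
              rw [ih _ _ hfs (by simp [List.all_append, List.all_cons, hpend, pvInert_triple, pvIsTrigLabel])]
              simp [pvRepl_t4, pvExtra_t4, pvSet2_cons]
            · rw [dif_neg hc4]
              by_cases hc5 : c = "ADJ;NEUT;PL"
              · subst hc5
                rw [dif_pos rfl, List.append_assoc fs]
                rw [ih _ _ hfs (by simp [List.all_append, List.all_cons, hpend, pvInert_triple, pvIsTrigLabel])]
                simp [pvRepl_t5, pvExtra_t5, pvSet2_cons]
              · rw [dif_neg hc5]
                rw [ih _ _ hfs hpend]
                have hlbl : pvIsTrigLabel c = false := by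
                  simp [pvIsTrigLabel, hc1, hc2, hc3, hc4, hc5]
                simp [pvRepl_none c hlbl, pvExtra_none c hlbl]

theorem pvLoopA_eq_pvExpandB (word : List (List String)) (h : ∀ f ∈ word, 3 ≤ f.length) :
    pvLoopA [] word = pvExpandB word := by
  have := pvLoopA_main word [] [] h rfl
  simpa [pvExpandB] using this

-- ===== VERDICT (by name: the statement is the Claim_ definition above) =====
theorem multiply_forms_spec : Claim_equal_multiply_forms := by
  intro word_list _hdom hpre
  unfold Spec_multiply_forms multiply_forms multiply_forms_alt
  exact List.map_congr_left fun word hw => pvLoopA_eq_pvExpandB word (hpre word hw)
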